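-- pv_equiv track=rewrite | github.com/ArjunChaddha/All-Projects | Project #1 - Algorithmic Trading Bot/SupportFile2.py | getStartandEndonHighs
-- ===== SOURCE A (Python) =====
-- def getStartandEndonHighs(sets, start='min', end='min'):
--     final = []
--     for set_ in sets:
--         minStart = min(e[0] for e in set_)
--         maxStart = max(e[0] for e in set_)
--         minFinish = min(e[1] for e in set_)
--         maxFinish = max(e[1] for e in set_)
--
--         if start == 'min':
--             s_ = minStart
--         else:
--             s_ = maxStart
--
--         if end == 'min':
--             f_ = minFinish
--         else:
--             f_ = maxFinish
--
--         final.append([s_, f_])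
--     return final
-- ===== SOURCE B (Python) =====
-- def getStartandEndonHighs(sets, start='min', end='min'):
--     si = 0 if start == 'min' else -1
--     fi = 0 if end == 'min' else -1
--     return [[sorted(e[0] for e in set_)[si], sorted(e[1] for e in set_)[fi]]
--             for set_ in sets]
-- ===== Notes on version B (the rewrite author's own statement) =====
-- stated objective: alternative
-- what changed: A computes four min/max reduction scans per set and branches afterwards; B instead sorts each set's start and finish values and indexes the sorted list at 0 or -1 according to the flags (sort-then-endpoint instead of extremum reduction).
-- outside the precondition, e.g. on getStartandEndonHighs([[]], 'min', 'min'): A raises ValueError, B raises IndexError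
import Mathlib
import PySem

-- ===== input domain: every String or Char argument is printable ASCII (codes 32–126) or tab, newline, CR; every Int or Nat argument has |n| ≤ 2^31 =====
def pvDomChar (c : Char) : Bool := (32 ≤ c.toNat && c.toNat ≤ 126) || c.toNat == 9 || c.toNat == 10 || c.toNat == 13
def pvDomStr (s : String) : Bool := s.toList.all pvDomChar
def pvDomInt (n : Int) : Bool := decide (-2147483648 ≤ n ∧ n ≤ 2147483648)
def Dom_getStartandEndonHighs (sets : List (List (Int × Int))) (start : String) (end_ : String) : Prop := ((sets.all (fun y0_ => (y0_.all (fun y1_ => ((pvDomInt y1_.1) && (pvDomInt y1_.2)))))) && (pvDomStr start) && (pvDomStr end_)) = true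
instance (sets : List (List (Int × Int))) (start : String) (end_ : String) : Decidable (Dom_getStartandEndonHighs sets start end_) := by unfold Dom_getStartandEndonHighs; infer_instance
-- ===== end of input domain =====

-- B sorts each set's start and finish values and takes the endpoint ([0] or [-1])
-- chosen by the flags, instead of A's four min/max reduction scans per set.


-- ===== PORT A =====
-- loop body of A for one set_ (Pre_ guarantees set_ ≠ [], so the .getD 0 defaults
-- standing for min/max's ValueError are never taken on admitted inputs)
def pvBodyA (set_ : List (Int × Int)) (start : String) (end_ : String) : List Int :=
  let minStart := (PySem.List.min? (set_.map (fun e => e.1)) (fun y => y)).getD 0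
  let maxStart := (PySem.List.max? (set_.map (fun e => e.1)) (fun y => y)).getD 0
  let minFinish := (PySem.List.min? (set_.map (fun e => e.2)) (fun y => y)).getD 0
  let maxFinish := (PySem.List.max? (set_.map (fun e => e.2)) (fun y => y)).getD 0
  let s_ := if start == "min" then minStart else maxStart
  let f_ := if end_ == "min" then minFinish else maxFinish
  [s_, f_]

def getStartandEndonHighs (sets : List (List (Int × Int))) (start : String) (end_ : String) : List (List Int) :=
  sets.foldl (fun final set_ => final ++ [pvBodyA set_ start end_]) []

-- ===== PORT B =====
-- comprehension body: sorted starts indexed at si, sorted finishes indexed at fi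
-- (the pyGetD default 0 stands for IndexError; never taken under Pre_: set_ ≠ [])
def pvBodyB (si fi : Int) (set_ : List (Int × Int)) : List Int :=
  [PySem.List.pyGetD (PySem.List.sorted (set_.map (fun e => e.1)) (fun x => x) false) si 0,
   PySem.List.pyGetD (PySem.List.sorted (set_.map (fun e => e.2)) (fun x => x) false) fi 0]

def getStartandEndonHighs_alt (sets : List (List (Int × Int))) (start : String) (end_ : String) : List (List Int) :=
  let si : Int := if start == "min" then 0 else -1
  let fi : Int := if end_ == "min" then 0 else -1
  sets.map (pvBodyB si fi)

-- ===== PRECONDITION & SPEC =====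
-- Pre_ excludes inputs containing an empty set, on which A raises ValueError (min of
-- an empty generator) and B raises IndexError (sorted(...)[0]).
def Pre_getStartandEndonHighs (sets : List (List (Int × Int))) (start : String) (end_ : String) : Prop :=
  ∀ s ∈ sets, s ≠ []
instance (sets : List (List (Int × Int))) (start : String) (end_ : String) : Decidable (Pre_getStartandEndonHighs sets start end_) := by unfold Pre_getStartandEndonHighs; infer_instance

def pvWitness_getStartandEndonHighs : (List (List (Int × Int))) × String × String :=
  ([[(1, 5), (2, 3)], [(0, 7)]], "min", "max")

def Spec_getStartandEndonHighs (sets : List (List (Int × Int))) (start : String) (end_ : String) (out : List (List Int)) : Prop := out = getStartandEndonHighs_alt sets start end_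
instance (sets : List (List (Int × Int))) (start : String) (end_ : String) (out : List (List Int)) : Decidable (Spec_getStartandEndonHighs sets start end_ out) := by unfold Spec_getStartandEndonHighs; infer_instance

-- ===== CLAIM =====
def Claim_equal_getStartandEndonHighs : Prop := ∀ (sets : List (List (Int × Int))) (start : String) (end_ : String), Dom_getStartandEndonHighs sets start end_ → Pre_getStartandEndonHighs sets start end_ → Spec_getStartandEndonHighs sets start end_ (getStartandEndonHighs sets start end_)

-- ===== LEMMAS AND PROOFS =====

-- head of the sorted list is min(l)
theorem pvSortedHeadMin (l : List Int) (h : l ≠ []) :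
    PySem.List.pyGetD (PySem.List.sorted l (fun x => x) false) 0 0
      = (PySem.List.min? l (fun y => y)).getD 0 := by
  obtain ⟨v, hv⟩ : ∃ v, PySem.List.min? l (fun y => y) = some v := by
    cases hm : PySem.List.min? l (fun y => y) with
    | none => exact absurd ((PySem.List.min?_eq_none_iff _ _).mp hm) h
    | some v => exact ⟨v, rfl⟩
  cases hs : PySem.List.sorted l (fun x => x) false with
  | nil => exact absurd ((PySem.List.sorted_eq_nil_iff _ _ _).mp hs) h
  | cons m t =>
    rw [PySem.List.pyGetD_zero_cons, hv, Option.getD_some]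
    have hmem : m ∈ l := (PySem.List.mem_sorted l (fun x => x) false m).mp
      (hs ▸ List.mem_cons_self)
    exact le_antisymm (PySem.List.key_head_sorted_le l (fun x => x) hs v (PySem.List.min?_mem hv))
      (PySem.List.min?_isMin hv m hmem)

-- last of the sorted list is max(l)
theorem pvSortedLastMax (l : List Int) (h : l ≠ []) :
    PySem.List.pyGetD (PySem.List.sorted l (fun x => x) false) (-1) 0
      = (PySem.List.max? l (fun y => y)).getD 0 := by
  obtain ⟨v, hv⟩ : ∃ v, PySem.List.max? l (fun y => y) = some v := by
    cases hm : PySem.List.max? l (fun y => y) with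
    | none => exact absurd ((PySem.List.max?_eq_none_iff _ _).mp hm) h
    | some v => exact ⟨v, rfl⟩
  have hsn : PySem.List.sorted l (fun x => x) false ≠ [] := by
    intro hnil; exact h ((PySem.List.sorted_eq_nil_iff _ _ _).mp hnil)
  rw [PySem.List.pyGetD_neg_one _ 0 hsn, hv, Option.getD_some]
  have hlast_mem : (PySem.List.sorted l (fun x => x) false).getLast hsn ∈ l :=
    (PySem.List.mem_sorted l (fun x => x) false _).mp (List.getLast_mem hsn)
  have hv_mem_ys : v ∈ PySem.List.sorted l (fun x => x) false :=
    (PySem.List.mem_sorted l (fun x => x) false v).mpr (PySem.List.max?_mem hv)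
  obtain ⟨p, hp, hpe⟩ := List.mem_iff_getElem.mp hv_mem_ys
  have hge : v ≤ (PySem.List.sorted l (fun x => x) false).getLast hsn := by
    rw [List.getLast_eq_getElem, ← hpe]
    exact PySem.List.sorted_id_getElem_mono l (p := p)
      (q := (PySem.List.sorted l (fun x => x) false).length - 1)
      (by omega) (Nat.sub_lt (List.length_pos_iff.mpr hsn) one_pos)
  exact le_antisymm (PySem.List.max?_isMax hv _ hlast_mem) hge

-- per-set agreement of the two bodies on a nonempty set
theorem pvBody_eq (set_ : List (Int × Int)) (start end_ : String) (h : set_ ≠ []) :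
    pvBodyA set_ start end_
      = pvBodyB (if start == "min" then 0 else -1) (if end_ == "min" then 0 else -1) set_ := by
  have h1 : set_.map (fun e => e.1) ≠ [] := by simpa using h
  have h2 : set_.map (fun e => e.2) ≠ [] := by simpa using h
  simp only [pvBodyA, pvBodyB]
  cases hs : (start == "min") <;> cases he : (end_ == "min") <;>
    simp [pvSortedHeadMin _ h1, pvSortedHeadMin _ h2, pvSortedLastMax _ h1, pvSortedLastMax _ h2]

-- ===== VERDICT =====
theorem getStartandEndonHighs_spec : Claim_equal_getStartandEndonHighs := by
  intro sets start end_ _hDom hPre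
  unfold Spec_getStartandEndonHighs getStartandEndonHighs getStartandEndonHighs_alt
  simp only [PySem.List.foldl_append_singleton_eq_map, List.nil_append]
  exact List.map_congr_left (fun s hs => pvBody_eq s start end_ (hPre s hs))
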